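-- pv_equiv track=rewrite | github.com/Frosselet/pdf-ocr | src/docpact/xlsx_extractor.py | _build_column_names_with_forward_fill
-- ===== SOURCE A (Python) =====
-- def _build_column_names_with_forward_fill(
--     header_rows: list[list[str]],
-- ) -> list[str]:
--     """Build column names from multi-row headers with forward-fill.
--
--     For each header row, empty cells inherit the preceding non-empty cell's
--     value (forward-fill). This handles merged header spans where a label like
--     "Revenue" spans cols 2-3 but only col 2 has the value.
--
--     Then stacks rows vertically with " / " separator, deduplicating consecutive
--     identical fragments.
--     """
--     if not header_rows:
--         return []
--
--     num_cols = max(len(row) for row in header_rows)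
--
--     # Forward-fill each header row independently
--     filled_rows: list[list[str]] = []
--     for row in header_rows:
--         filled: list[str] = []
--         last_val = ""
--         for ci in range(num_cols):
--             val = row[ci].strip() if ci < len(row) else ""
--             if val:
--                 last_val = val
--                 filled.append(val)
--             else:
--                 filled.append(last_val)
--         filled_rows.append(filled)
--
--     # Stack rows with " / " separator, dedup consecutive identical fragments
--     column_names: list[str] = []
--     for ci in range(num_cols):
--         parts: list[str] = []
--         for row in filled_rows:
--             val = row[ci] if ci < len(row) else ""
--             if val and (not parts or val != parts[-1]):
--                 parts.append(val)
--         column_names.append(" / ".join(parts))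
--
--     return column_names
-- ===== SOURCE B (Python) =====
-- def _build_column_names_with_forward_fill(
--     header_rows: list[list[str]],
-- ) -> list[str]:
--     """Single streaming pass per column: no intermediate filled_rows grid.
--
--     A per-row forward-fill accumulator (last_vals) is initialized once and
--     persists across the outer column loop, so each column's parts are built
--     directly while filling.
--     """
--     if not header_rows:
--         return []
--
--     num_cols = max(len(row) for row in header_rows)
--
--     last_vals = [""] * len(header_rows)
--     column_names: list[str] = []
--     for ci in range(num_cols):
--         parts: list[str] = []
--         for r, row in enumerate(header_rows):
--             val = row[ci].strip() if ci < len(row) else ""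
--             if val:
--                 last_vals[r] = val
--             lv = last_vals[r]
--             if lv and (not parts or lv != parts[-1]):
--                 parts.append(lv)
--         column_names.append(" / ".join(parts))
--     return column_names
-- ===== Notes on version B (the rewrite author's own statement) =====
-- stated objective: simpler
-- what changed: Drops the intermediate filled_rows grid: a single column-outer loop streams each column, maintaining one persistent per-row forward-fill accumulator and building each column name directly.
import Mathlib
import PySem

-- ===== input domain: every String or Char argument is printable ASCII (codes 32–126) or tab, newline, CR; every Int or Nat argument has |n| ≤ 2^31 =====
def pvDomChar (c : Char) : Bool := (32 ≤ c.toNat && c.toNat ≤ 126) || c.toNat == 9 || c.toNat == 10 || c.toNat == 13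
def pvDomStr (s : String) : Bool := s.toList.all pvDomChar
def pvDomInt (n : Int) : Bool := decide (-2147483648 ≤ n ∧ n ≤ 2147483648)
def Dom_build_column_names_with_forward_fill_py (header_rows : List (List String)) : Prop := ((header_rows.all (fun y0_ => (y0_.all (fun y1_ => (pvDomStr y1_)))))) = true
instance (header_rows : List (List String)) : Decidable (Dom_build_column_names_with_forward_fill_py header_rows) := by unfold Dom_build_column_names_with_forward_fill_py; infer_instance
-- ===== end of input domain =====

-- B replaces A's two-phase grid (forward-fill all rows, then stack columns) by one streaming
-- column-outer loop with a persistent per-row forward-fill accumulator; objective: simpler.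

-- ===== PORT A =====
-- forward-fill loop of A: for ci in range(num_cols): val = row[ci].strip() if ci < len(row) else ""; …
def pvFillRow (row : List String) (last : String) : List Nat → List String
  | [] => []
  | ci :: rest =>
    let val := if ci < row.length then PySem.Str.strip (row.getD ci "") else ""
    if val ≠ "" then val :: pvFillRow row val rest
    else last :: pvFillRow row last rest

-- parts loop of A: if val and (not parts or val != parts[-1]): parts.append(val)
def pvDedupStep (parts : List String) (val : String) : List String :=
  if val ≠ "" ∧ parts.getLast? ≠ some val then parts ++ [val] else parts

def pvPartsA (filled : List (List String)) (ci : Nat) : List String :=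
  filled.foldl (fun parts row =>
    let val := if ci < row.length then row.getD ci "" else ""
    pvDedupStep parts val) []

def build_column_names_with_forward_fill_py (header_rows : List (List String)) : List String :=
  if header_rows = [] then []
  else
    -- max(len(row) for row in header_rows): running max over the nonempty list of lengths
    let numCols := (header_rows.map List.length).foldl Nat.max 0
    let filledRows := header_rows.map (fun row => pvFillRow row "" (List.range numCols))
    (List.range numCols).map (fun ci => PySem.Str.join " / " (pvPartsA filledRows ci))

-- ===== PORT B =====
-- inner row loop of B at column ci: pairs = rows zipped with last_vals, parts accumulator;
-- returns (updated last_vals, final parts)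
def pvColGo (ci : Nat) : List (List String × String) → List String → (List String × List String)
  | [], parts => ([], parts)
  | (row, last) :: rest, parts =>
    let val := if ci < row.length then PySem.Str.strip (row.getD ci "") else ""
    let lv := if val ≠ "" then val else last
    let parts' := if lv ≠ "" ∧ parts.getLast? ≠ some lv then parts ++ [lv] else parts
    let res := pvColGo ci rest parts'
    (lv :: res.1, res.2)

def build_column_names_with_forward_fill_py_alt (header_rows : List (List String)) : List String :=
  if header_rows = [] then []
  else
    let numCols := (header_rows.map List.length).foldl Nat.max 0
    let init : List String := header_rows.map (fun _ => "")
    ((List.range numCols).foldl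
      (fun (st : List String × List String) ci =>
        let res := pvColGo ci (header_rows.zip st.1) []
        (res.1, st.2 ++ [PySem.Str.join " / " res.2]))
      (init, [])).2

-- ===== PRECONDITION & SPEC =====
def Spec_build_column_names_with_forward_fill_py (header_rows : List (List String)) (out : List String) : Prop := out = build_column_names_with_forward_fill_py_alt header_rows
instance (header_rows : List (List String)) (out : List String) : Decidable (Spec_build_column_names_with_forward_fill_py header_rows out) := by unfold Spec_build_column_names_with_forward_fill_py; infer_instance

-- ===== CLAIM (what is proved, stated in full; the proofs are below) =====
def Claim_equal_build_column_names_with_forward_fill_py : Prop := ∀ (header_rows : List (List String)), Dom_build_column_names_with_forward_fill_py header_rows → Spec_build_column_names_with_forward_fill_py header_rows (build_column_names_with_forward_fill_py header_rows)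

-- ===== LEMMAS AND PROOFS =====

-- the shared one-cell forward-fill step
def pvG (row : List String) (last : String) (ci : Nat) : String :=
  let val := if ci < row.length then PySem.Str.strip (row.getD ci "") else ""
  if val ≠ "" then val else last

-- last_vals value of a row after the first ci columns
def pvLastAt (row : List String) (ci : Nat) : String :=
  (List.range ci).foldl (pvG row) ""

theorem pvFillRow_cons (row : List String) (last : String) (ci : Nat) (rest : List Nat) :
    pvFillRow row last (ci :: rest) = pvG row last ci :: pvFillRow row (pvG row last ci) rest := by
  simp only [pvFillRow, pvG]
  split_ifs <;> simp_all

theorem pvFillRow_length (row : List String) (last : String) (l : List Nat) :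
    (pvFillRow row last l).length = l.length := by
  induction l generalizing last with
  | nil => simp [pvFillRow]
  | cons ci rest ih => rw [pvFillRow_cons]; simp [ih]

theorem pvFillRow_getD (row : List String) (last : String) (l : List Nat) (i : Nat)
    (hi : i < l.length) :
    (pvFillRow row last l).getD i "" = (l.take (i + 1)).foldl (pvG row) last := by
  induction l generalizing last i with
  | nil => simp at hi
  | cons ci rest ih =>
    rw [pvFillRow_cons]
    cases i with
    | zero => simp
    | succ j =>
      simp only [List.getD_cons_succ, List.take_succ_cons, List.foldl_cons]
      exact ih _ j (by simpa using hi)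

theorem pvFillRow_getD_range (row : List String) (n i : Nat) (hi : i < n) :
    (pvFillRow row "" (List.range n)).getD i "" = pvLastAt row (i + 1) := by
  rw [pvFillRow_getD row "" _ i (by simpa using hi), List.take_range]
  simp [pvLastAt, Nat.min_eq_left (by omega : i + 1 ≤ n)]

theorem pvLastAt_succ (row : List String) (ci : Nat) :
    pvLastAt row (ci + 1) = pvG row (pvLastAt row ci) ci := by
  simp [pvLastAt, List.range_succ]

theorem pvColGo_fst (ci : Nat) (pairs : List (List String × String)) (parts : List String) :
    (pvColGo ci pairs parts).1 = pairs.map (fun p => pvG p.1 p.2 ci) := by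
  induction pairs generalizing parts with
  | nil => rfl
  | cons p rest ih =>
    obtain ⟨row, last⟩ := p
    have h : (pvColGo ci ((row, last) :: rest) parts).1
        = pvG row last ci :: (pvColGo ci rest (pvDedupStep parts (pvG row last ci))).1 := rfl
    rw [h, ih, List.map_cons]

theorem pvColGo_snd (ci : Nat) (pairs : List (List String × String)) (parts : List String) :
    (pvColGo ci pairs parts).2 =
      pairs.foldl (fun acc p => pvDedupStep acc (pvG p.1 p.2 ci)) parts := by
  induction pairs generalizing parts with
  | nil => rfl
  | cons p rest ih =>
    obtain ⟨row, last⟩ := p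
    have h : (pvColGo ci ((row, last) :: rest) parts).2
        = (pvColGo ci rest (pvDedupStep parts (pvG row last ci))).2 := rfl
    rw [h, ih, List.foldl_cons]

theorem pvPartsA_eq (rows : List (List String)) (n ci : Nat) (hci : ci < n) :
    pvPartsA (rows.map (fun row => pvFillRow row "" (List.range n))) ci =
      rows.foldl (fun acc row => pvDedupStep acc (pvG row (pvLastAt row ci) ci)) [] := by
  unfold pvPartsA
  rw [List.foldl_map]
  apply PySem.List.foldl_congr_mem
  intro acc row _
  have hlen : ci < (pvFillRow row "" (List.range n)).length := by
    rw [pvFillRow_length]; simpa using hci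
  simp only [hlen, if_pos]
  rw [pvFillRow_getD_range row n ci hci, pvLastAt_succ]

theorem pvZip_map_self {α β : Type} (l : List α) (f : α → β) :
    l.zip (l.map f) = l.map (fun x => (x, f x)) := by
  induction l with
  | nil => simp
  | cons x t ih => simp [ih]

-- main invariant of B's outer fold
theorem pvFold_invariant (rows : List (List String)) (n : Nat) (k : Nat) (hk : k ≤ n) :
    (List.range k).foldl
      (fun (st : List String × List String) ci =>
        let (ls, parts) := pvColGo ci (rows.zip st.1) []
        (ls, st.2 ++ [PySem.Str.join " / " parts]))
      (rows.map (fun _ => ""), []) =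
    (rows.map (fun row => pvLastAt row k),
     (List.range k).map (fun ci =>
        PySem.Str.join " / " (rows.foldl
          (fun acc row => pvDedupStep acc (pvG row (pvLastAt row ci) ci)) []))) := by
  induction k with
  | zero => simp [pvLastAt]
  | succ k ih =>
    have hk' : k ≤ n := by omega
    rw [List.range_succ, List.foldl_append, ih hk', List.foldl_cons, List.foldl_nil,
      List.map_append]
    simp only [Prod.mk.injEq]
    constructor
    · show (pvColGo k (rows.zip (rows.map (fun row => pvLastAt row k))) []).1 = _
      rw [pvColGo_fst, pvZip_map_self, List.map_map]
      apply List.map_congr_left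
      intro row _
      simp [pvLastAt_succ]
    · show _ ++ [PySem.Str.join " / " (pvColGo k (rows.zip (rows.map (fun row => pvLastAt row k))) []).2] = _
      rw [pvColGo_snd, pvZip_map_self, List.foldl_map]
      simp

-- ===== VERDICT (by name: the statement is the Claim_ definition above) =====
theorem build_column_names_with_forward_fill_py_spec : Claim_equal_build_column_names_with_forward_fill_py := by
  intro header_rows _
  unfold Spec_build_column_names_with_forward_fill_py
  unfold build_column_names_with_forward_fill_py build_column_names_with_forward_fill_py_alt
  by_cases h : header_rows = []
  · simp [h]
  · rw [if_neg h, if_neg h]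
    show _ = ((List.range _).foldl _ (header_rows.map (fun _ => ""), [])).2
    rw [pvFold_invariant header_rows _ _ (le_refl _)]
    apply List.map_congr_left
    intro ci hci
    rw [pvPartsA_eq header_rows _ ci (by simpa using hci)]
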